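-- pv_equiv track=rewrite | github.com/EseRuiz/py_proyects | proyects/lists/dicts_methods.py | add_item
-- ===== SOURCE A (Python) =====
-- def add_item(current_cart, items_to_add):
--     """Add items to shopping cart.
--
--     :param current_cart: dict - the current shopping cart.
--     :param items_to_add: iterable - items to add to the cart.
--     :return: dict - the updated user cart dictionary.
--     """
--     list_item = list(items_to_add)
--     dict_item = {llave: list_item.count(llave) for llave in list_item}
--     for key,value in dict_item.items():
--         if key in current_cart.keys():
--             current_cart[key] += value
--         else :current_cart[key]=value
--     return (current_cart)
-- ===== SOURCE B (Python) =====
-- def add_item(current_cart, items_to_add):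
--     """Add items to shopping cart.
--
--     Single pass over items_to_add, accumulating counts directly into
--     current_cart (mutates and returns current_cart, like the original).
--     """
--     for item in items_to_add:
--         current_cart[item] = current_cart.get(item, 0) + 1
--     return current_cart
-- ===== Notes on version B (the rewrite author's own statement) =====
-- stated objective: faster
-- what changed: Drops A's intermediate count-dictionary (built with a quadratic list.count comprehension) and its separate merge loop; B accumulates each item directly into current_cart in one pass with dict.get.
import Mathlib
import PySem

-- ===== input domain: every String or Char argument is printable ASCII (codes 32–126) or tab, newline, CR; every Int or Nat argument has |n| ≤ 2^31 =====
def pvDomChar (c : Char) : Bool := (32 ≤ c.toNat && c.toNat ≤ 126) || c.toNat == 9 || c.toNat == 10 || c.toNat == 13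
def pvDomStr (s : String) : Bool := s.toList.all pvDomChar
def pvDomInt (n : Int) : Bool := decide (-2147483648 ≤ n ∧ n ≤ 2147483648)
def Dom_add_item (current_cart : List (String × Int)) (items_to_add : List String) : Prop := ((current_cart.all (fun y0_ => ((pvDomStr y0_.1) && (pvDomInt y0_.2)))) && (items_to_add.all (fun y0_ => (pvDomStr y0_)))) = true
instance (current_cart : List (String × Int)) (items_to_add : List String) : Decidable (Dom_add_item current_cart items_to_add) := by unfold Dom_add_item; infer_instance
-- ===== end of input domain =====

-- B replaces A's intermediate count-dictionary and separate merge loop by one direct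
-- accumulation pass over items_to_add (simpler). Both Pythons mutate current_cart the
-- same way and return it; the equivalence proved here is about the returned value.

-- ===== PORT A =====
def add_item (current_cart : List (String × Int)) (items_to_add : List String) : List (String × Int) :=
  let cart : PySem.Dict String Int := PySem.Dict.ofList current_cart
  let list_item := items_to_add
  let dict_item : PySem.Dict String Int :=
    list_item.foldl (fun d llave => d.insert llave ((PySem.List.count list_item llave : Nat) : Int))
      PySem.Dict.empty
  (dict_item.items.foldl
    (fun c kv => if c.contains kv.1 then c.insert kv.1 (c.getD kv.1 0 + kv.2) else c.insert kv.1 kv.2)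
    cart).items

-- ===== PORT B =====
def add_item_alt (current_cart : List (String × Int)) (items_to_add : List String) : List (String × Int) :=
  (items_to_add.foldl (fun c item => c.insert item (c.getD item 0 + 1))
    (PySem.Dict.ofList current_cart)).items

-- ===== PRECONDITION & SPEC =====
def Spec_add_item (current_cart : List (String × Int)) (items_to_add : List String) (out : List (String × Int)) : Prop := out = add_item_alt current_cart items_to_add
instance (current_cart : List (String × Int)) (items_to_add : List String) (out : List (String × Int)) : Decidable (Spec_add_item current_cart items_to_add out) := by unfold Spec_add_item; infer_instance

-- ===== CLAIM (what is proved, stated in full; the proofs are below) =====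
def Claim_equal_add_item : Prop := ∀ (current_cart : List (String × Int)) (items_to_add : List String), Dom_add_item current_cart items_to_add → Spec_add_item current_cart items_to_add (add_item current_cart items_to_add)

-- ===== LEMMAS AND PROOFS =====

-- A's merge step ('+= value' when present, '= value' when absent) is one insert.
theorem mergeStep_eq :
    (fun (c : PySem.Dict String Int) (kv : String × Int) =>
      if c.contains kv.1 then c.insert kv.1 (c.getD kv.1 0 + kv.2) else c.insert kv.1 kv.2)
    = (fun c kv => c.insert kv.1 (c.getD kv.1 0 + kv.2)) := by
  funext c kv
  by_cases h : c.contains kv.1 = true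
  · simp [h]
  · have h' : c.contains kv.1 = false := by simpa using h
    rw [if_neg (by simp [h']), PySem.Dict.getD_of_not_contains c 0 h', zero_add]

-- Inserting a key-determined value for every element of l.
theorem getD_foldl_insert_const (l : List String) (f : String → Int)
    (d : PySem.Dict String Int) (v : String) :
    (l.foldl (fun d x => d.insert x (f x)) d).getD v 0
      = if v ∈ l then f v else d.getD v 0 := by
  induction l generalizing d with
  | nil => simp
  | cons x xs ih =>
    rw [List.foldl_cons, ih]
    by_cases hv : v ∈ xs
    · simp [hv]
    · by_cases hx : v = x
      · subst hx; simp [hv, PySem.Dict.getD_insert_self]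
      · simp [hv, hx, PySem.Dict.getD_insert_of_ne _ _ _ hx]

-- A's comprehension {k: list.count(k) for k in list} as an items list.
theorem items_countDict (L : List String) :
    (L.foldl (fun d llave => d.insert llave ((PySem.List.count L llave : Nat) : Int))
        PySem.Dict.empty).items
      = (PySem.Set.ofList L).map (fun k => (k, ((PySem.List.count L k : Nat) : Int))) := by
  have hkeys : (L.foldl (fun d llave => d.insert llave ((PySem.List.count L llave : Nat) : Int))
      (PySem.Dict.empty : PySem.Dict String Int)).keys = PySem.Set.ofList L := by
    rw [PySem.Dict.keys_foldl_insert L (fun _ x => ((PySem.List.count L x : Nat) : Int))]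
    rw [PySem.Dict.keys_empty, PySem.Set.update_nil_left]
  have hnd : (L.foldl (fun d llave => d.insert llave ((PySem.List.count L llave : Nat) : Int))
      (PySem.Dict.empty : PySem.Dict String Int)).keys.Nodup := by
    rw [hkeys]; exact PySem.Set.nodup_ofList L
  rw [PySem.Dict.items_eq_map_keys _ hnd 0, hkeys]
  refine List.map_congr_left (fun k hk => ?_)
  have hkL : k ∈ L := (PySem.Set.mem_ofList _ _).1 hk
  rw [getD_foldl_insert_const, if_pos hkL]

-- Merging a nodup-keyed association list built from a value function.
theorem getD_foldl_merge_map (S : List String) (f : String → Int) (hS : S.Nodup)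
    (d : PySem.Dict String Int) (v : String) :
    ((S.map (fun k => (k, f k))).foldl (fun c p => c.insert p.1 (c.getD p.1 0 + p.2)) d).getD v 0
      = if v ∈ S then d.getD v 0 + f v else d.getD v 0 := by
  induction S generalizing d with
  | nil => simp
  | cons x xs ih =>
    rw [List.map_cons, List.foldl_cons, ih (List.nodup_cons.1 hS).2]
    by_cases hv : v ∈ xs
    · have hx : v ≠ x := fun h => (List.nodup_cons.1 hS).1 (h ▸ hv)
      simp [hv, PySem.Dict.getD_insert_of_ne _ _ _ hx]
    · by_cases hx : v = x
      · subst hx; simp [hv, PySem.Dict.getD_insert_self]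
      · simp [hv, hx, PySem.Dict.getD_insert_of_ne _ _ _ hx]

-- Updating a set of keys by the deduplicated list is updating by the list.
theorem set_update_ofList (s : PySem.Set String) (L : List String) :
    PySem.Set.update s (PySem.Set.ofList L) = PySem.Set.update s L := by
  rw [PySem.Set.update_eq_append_filter, PySem.Set.update_eq_append_filter,
    PySem.Set.ofList_ofList]

-- ===== VERDICT (by name: the statement is the Claim_ definition above) =====
theorem add_item_spec : Claim_equal_add_item := by
  intro current_cart items_to_add _
  unfold Spec_add_item add_item add_item_alt
  dsimp only
  rw [mergeStep_eq, items_countDict]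
  set d : PySem.Dict String Int := PySem.Dict.ofList current_cart with hd
  set L := items_to_add
  have hndd : d.keys.Nodup := PySem.Dict.nodup_keys_ofList current_cart
  set cnt : String → Int := fun k => ((PySem.List.count L k : Nat) : Int) with hcnt
  set dictA := ((PySem.Set.ofList L).map (fun k => (k, cnt k))).foldl
    (fun c p => c.insert p.1 (c.getD p.1 0 + p.2)) d with hA
  set dictB := L.foldl (fun c item => c.insert item (c.getD item 0 + 1)) d with hB
  have hkeysA : dictA.keys = PySem.Set.update d.keys L := by
    rw [hA, PySem.Dict.keys_foldl_insert_key ((PySem.Set.ofList L).map (fun k => (k, cnt k)))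
      Prod.fst (fun c p => c.getD p.1 0 + p.2) d]
    rw [List.map_map]
    have : (Prod.fst ∘ fun k => (k, cnt k)) = id := by funext k; rfl
    rw [this, List.map_id, set_update_ofList]
  have hkeysB : dictB.keys = PySem.Set.update d.keys L := by
    rw [hB, PySem.Dict.keys_foldl_insert L (fun c x => c.getD x 0 + 1) d]
  have hndA : dictA.keys.Nodup := by
    rw [hA]
    exact PySem.Dict.nodup_keys_foldl_insert_key _ Prod.fst _ d hndd
  have hndB : dictB.keys.Nodup := by
    rw [hB]
    exact PySem.Dict.nodup_keys_foldl_insert L (fun c x => c.getD x 0 + 1) d hndd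
  have hgetD : ∀ v, dictA.getD v 0 = dictB.getD v 0 := by
    intro v
    rw [hA, hB, getD_foldl_merge_map (PySem.Set.ofList L) cnt (PySem.Set.nodup_ofList L) d v,
      PySem.Dict.getD_foldl_insert_add_one L d v]
    by_cases hv : v ∈ L
    · rw [if_pos ((PySem.Set.mem_ofList _ _).2 hv), hcnt]
      simp [PySem.List.count_eq]
    · rw [if_neg (fun h => hv ((PySem.Set.mem_ofList _ _).1 h))]
      rw [List.count_eq_zero.2 hv]
      simp
  rw [PySem.Dict.items_eq_map_keys dictA hndA 0, PySem.Dict.items_eq_map_keys dictB hndB 0,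
    hkeysA, hkeysB]
  exact List.map_congr_left (fun k _ => by rw [hgetD k])
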